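-- pv_equiv track=rewrite | github.com/dede6giu/CIC0235-TR1 | CamadaFisica.py | bipolar
-- ===== SOURCE A (Python) =====
-- def bipolar(bit_string: list[bool]) -> list[int]:
--     """
--     Encodes bits using Bipolar (Alternate Mark Inversion - AMI) modulation.
--     Logic 1 alternates between +1V and -1V to reduce DC component,
--     while logic 0 remains at 0V.
--
--     :param bit_string: Input digital bit sequence (True/False for 1/0)
--     :type bit_string: list[bool]
--     :return: List of integer voltage levels representing the Bipolar signal
--     :rtype: list[int]
--     """
--
--
--     sinal_codificado = []
--     aux = 1
--
--     for bit in bit_string: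
--         if not bit:
--             sinal_codificado.append(0)
--         else:
--             sinal_codificado.append(aux)
--             aux = -aux  # alternate polarity for each '1'
--
--     return sinal_codificado
-- ===== SOURCE B (Python) =====
-- def bipolar(bit_string: list[bool]) -> list[int]:
--     """Two-pass AMI encoding: prefix-count of ones, then parity-to-sign mapping."""
--     prefix_ones = []
--     c = 0
--     for b in bit_string:
--         c += int(b)
--         prefix_ones.append(c)
--     return [0 if not b else (1 if c % 2 == 1 else -1)
--             for b, c in zip(bit_string, prefix_ones)]
-- ===== Notes on version B (the rewrite author's own statement) =====
-- stated objective: alternative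
-- what changed: Replaces the single stateful loop with an inline alternating sign by two passes: a prefix-count table of ones, then a stateless parity-to-sign mapping over the zipped bits.
import Mathlib
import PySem

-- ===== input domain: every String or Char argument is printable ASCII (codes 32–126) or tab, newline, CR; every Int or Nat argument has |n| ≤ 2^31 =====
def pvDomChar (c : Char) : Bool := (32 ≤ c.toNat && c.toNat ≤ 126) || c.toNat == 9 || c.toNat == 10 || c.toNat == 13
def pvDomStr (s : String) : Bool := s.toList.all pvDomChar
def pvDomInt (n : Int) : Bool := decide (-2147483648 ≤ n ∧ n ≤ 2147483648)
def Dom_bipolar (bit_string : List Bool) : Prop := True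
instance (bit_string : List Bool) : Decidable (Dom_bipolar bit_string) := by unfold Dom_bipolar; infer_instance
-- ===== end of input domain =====

-- B replaces A's single stateful loop (alternating sign variable) with two passes: a prefix-count-of-ones table, then a stateless parity-to-sign map; same cost, different decomposition.

-- ===== PORT A =====
-- A: one loop carrying (output list, aux sign); append 0 for a zero bit, aux for a one bit (then flip aux).
def bipolar (bit_string : List Bool) : List Int :=
  (bit_string.foldl (fun (st : List Int × Int) bit =>
      if !bit then (st.1 ++ [0], st.2)
      else (st.1 ++ [st.2], -st.2)) ([], 1)).1

-- ===== PORT B =====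
-- B pass 1: running count of ones up through each index.
def prefixOnes (bit_string : List Bool) : List Int :=
  (bit_string.foldl (fun (st : List Int × Int) b =>
      let c := st.2 + (if b then 1 else 0)
      (st.1 ++ [c], c)) ([], 0)).1

-- B pass 2: stateless mapping over bits zipped with the prefix table.
def bipolar_alt (bit_string : List Bool) : List Int :=
  (bit_string.zip (prefixOnes bit_string)).map
    (fun p => if !p.1 then 0 else if p.2 % 2 == 1 then 1 else -1)

-- ===== PRECONDITION & SPEC =====
def Spec_bipolar (bit_string : List Bool) (out : List Int) : Prop := out = bipolar_alt bit_string
instance (bit_string : List Bool) (out : List Int) : Decidable (Spec_bipolar bit_string out) := by unfold Spec_bipolar; infer_instance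

-- ===== CLAIM (what is proved, stated in full; the proofs are below) =====
def Claim_equal_bipolar : Prop := ∀ (bit_string : List Bool), Dom_bipolar bit_string → Spec_bipolar bit_string (bipolar bit_string)

-- ===== LEMMAS AND PROOFS =====

-- recursive characterisation of A's loop
def goA : List Bool → Int → List Int
  | [], _ => []
  | b :: t, aux => if b then aux :: goA t (-aux) else 0 :: goA t aux

lemma bipolar_foldl_eq (l : List Bool) (acc : List Int) (aux : Int) :
    (l.foldl (fun (st : List Int × Int) bit =>
      if !bit then (st.1 ++ [0], st.2)
      else (st.1 ++ [st.2], -st.2)) (acc, aux)).1 = acc ++ goA l aux := by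
  induction l generalizing acc aux with
  | nil => simp [goA]
  | cons b t ih =>
    cases b
    · show (List.foldl _ ((acc ++ [0] : List Int), aux) t).1 = acc ++ goA (false :: t) aux
      rw [ih]; simp [goA]
    · show (List.foldl _ ((acc ++ [aux] : List Int), -aux) t).1 = acc ++ goA (true :: t) aux
      rw [ih]; simp [goA]

-- recursive characterisation of the prefix table
def prefList : List Bool → Int → List Int
  | [], _ => []
  | false :: t, c => c :: prefList t c
  | true :: t, c => (c + 1) :: prefList t (c + 1)

lemma prefixOnes_foldl_eq (l : List Bool) (acc : List Int) (c : Int) :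
    (l.foldl (fun (st : List Int × Int) b =>
      let c := st.2 + (if b then 1 else 0)
      (st.1 ++ [c], c)) (acc, c)).1 = acc ++ prefList l c := by
  induction l generalizing acc c with
  | nil => simp [prefList]
  | cons b t ih =>
    cases b
    · show (List.foldl _ ((acc ++ [c + 0] : List Int), c + 0) t).1 = acc ++ prefList (false :: t) c
      rw [ih]; simp [prefList]
    · show (List.foldl _ ((acc ++ [c + 1] : List Int), c + 1) t).1 = acc ++ prefList (true :: t) c
      rw [ih]; simp [prefList]

-- recursive characterisation of B's second pass composed with the prefix table
lemma zip_map_eq_goA (l : List Bool) (c aux : Int)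
    (h : aux = if c % 2 = 0 then 1 else -1) :
    (l.zip (prefList l c)).map
      (fun p => if !p.1 then 0 else if p.2 % 2 == 1 then 1 else -1) = goA l aux := by
  induction l generalizing c aux with
  | nil => simp [goA]
  | cons b t ih =>
    cases b with
    | false =>
      simp only [prefList, List.zip_cons_cons, List.map_cons, goA]
      simp only [Bool.not_false, if_true, Bool.false_eq_true, if_false, List.cons.injEq]
      exact ⟨trivial, ih c aux h⟩
    | true =>
      have haux' : -aux = if (c + 1) % 2 = 0 then (1 : Int) else -1 := by
        rcases Int.emod_two_eq c with h0 | h1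
        · have : (c + 1) % 2 = 1 := by omega
          simp [this, h, h0]
        · have : (c + 1) % 2 = 0 := by omega
          simp [this, h, h1]
      simp only [prefList, List.zip_cons_cons, List.map_cons, goA]
      simp only [Bool.not_true, Bool.false_eq_true, if_false, if_true, List.cons.injEq]
      refine ⟨?_, ih (c + 1) (-aux) haux'⟩
      rcases Int.emod_two_eq c with h0 | h1
      · have : (c + 1) % 2 = 1 := by omega
        simp [this, h, h0]
      · have : (c + 1) % 2 = 0 := by omega
        simp [this, h, h1]

-- ===== VERDICT (by name: the statement is the Claim_ definition above) =====
theorem bipolar_spec : Claim_equal_bipolar := by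
  intro l _
  unfold Spec_bipolar bipolar bipolar_alt prefixOnes
  rw [bipolar_foldl_eq, prefixOnes_foldl_eq]
  simp only [List.nil_append]
  exact (zip_map_eq_goA l 0 1 (by norm_num)).symm
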